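-- pv_equiv track=rewrite | github.com/bharadwajvyadavalli/coding_patterns | subsets.py | subsets_with_constraints
-- ===== SOURCE A (Python) =====
-- from typing import List, Set, Tuple
--
-- def subsets_with_constraints(nums: List[int], min_size: int,
--                              max_size: int, target_sum: int) -> List[List[int]]:
--     """
--     Custom Hard - Subsets with Multiple Constraints
--
--     Find all subsets that:
--     1. Have size between min_size and max_size (inclusive)
--     2. Sum equals target_sum
--     3. Handle duplicates in input array
--
--     Algorithm:
--     1. Sort array to handle duplicates
--     2. Use backtracking with pruning
--     3. Skip duplicates at same recursion level
--     4. Prune based on sum and size constraints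
--
--     Time: O(2^n), Space: O(n)
--
--     Example:
--     nums = [1,2,2,3,3,4], min_size=2, max_size=4, target_sum=8
--     Output: [[1,3,4], [2,2,4], [2,3,3], [1,2,2,3]]
--     """
--     nums.sort()
--     result = []
--
--     def backtrack(start: int, path: List[int], current_sum: int):
--         # Check if current subset meets criteria
--         if min_size <= len(path) <= max_size and current_sum == target_sum:
--             result.append(path[:])
--
--         # Pruning conditions
--         if len(path) >= max_size or current_sum >= target_sum:
--             return
--
--         for i in range(start, len(nums)):
--             # Skip duplicates at same level
--             if i > start and nums[i] == nums[i - 1]: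
--                 continue
--
--             # Further pruning: if adding this number exceeds target
--             if current_sum + nums[i] > target_sum:
--                 break  # Since array is sorted, all following will also exceed
--
--             path.append(nums[i])
--             backtrack(i + 1, path, current_sum + nums[i])
--             path.pop()
--
--     backtrack(0, [], 0)
--     return result
-- ===== SOURCE B (Python) =====
-- def subsets_with_constraints(nums, min_size, max_size, target_sum):
--     """Run-length grouped re-implementation: same return value, same in-place
--     nums.sort() mutation as the original."""
--     nums.sort()
--     groups = _groups(nums)
--
--     def rec(gs, path, s):
--         out = []
--         if min_size <= len(path) <= max_size and s == target_sum:
--             out.append(path[:])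
--         if len(path) >= max_size or s >= target_sum:
--             return out
--         for j in range(len(gs)):
--             v, c = gs[j]
--             if s + v > target_sum:
--                 break
--             child = ([(v, c - 1)] if c > 1 else []) + gs[j + 1:]
--             out.extend(rec(child, path + [v], s + v))
--         return out
--
--     return rec(groups, [], 0)
--
--
-- def _groups(nums):
--     """Compress a sorted list into (value, run length) pairs."""
--     if not nums:
--         return []
--     v = nums[0]
--     run = 1
--     while run < len(nums) and nums[run] == v:
--         run += 1
--     return [(v, run)] + _groups(nums[run:])
-- ===== Notes on version B (the rewrite author's own statement) =====
-- stated objective: alternative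
-- what changed: Replaces A's index-based backtracking with a duplicate-skip test (nums[i]==nums[i-1]) by a recursion over the run-length-compressed (value, count) group list of the sorted input: each step consumes one copy of a group (decrementing its count) and recurses on the group suffix, so the inner duplicate scan disappears.
import Mathlib
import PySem

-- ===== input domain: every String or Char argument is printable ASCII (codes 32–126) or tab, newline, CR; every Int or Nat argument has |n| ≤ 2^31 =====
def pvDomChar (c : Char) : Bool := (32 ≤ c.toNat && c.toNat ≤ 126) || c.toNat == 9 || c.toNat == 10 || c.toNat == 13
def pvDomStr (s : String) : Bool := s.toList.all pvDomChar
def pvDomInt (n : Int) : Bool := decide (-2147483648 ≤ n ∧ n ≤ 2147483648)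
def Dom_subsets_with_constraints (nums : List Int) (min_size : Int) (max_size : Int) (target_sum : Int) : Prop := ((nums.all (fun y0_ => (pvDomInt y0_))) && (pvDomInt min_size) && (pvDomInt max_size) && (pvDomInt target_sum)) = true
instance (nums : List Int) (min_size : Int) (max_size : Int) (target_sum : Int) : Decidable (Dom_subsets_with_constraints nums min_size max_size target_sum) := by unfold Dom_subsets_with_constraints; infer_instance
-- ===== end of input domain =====

-- B replaces A's index-based backtracking with duplicate-skipping by a recursion over
-- run-length (value, count) groups of the sorted input (objective: alternative).
-- Both A and B sort `nums` in place; the equivalence proved here is about the return value.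

-- ===== PORT A =====
-- backtrack(start, path, current_sum): record-at-entry, prune, then the index loop.
-- range(start, len(nums)) is ported with rem = remaining iterations; the recursive
-- backtrack call is passed to the loop as `bt`; fuel bounds the recursion depth and
-- is sufficient at the top-level call (each level increases start, which stays ≤ len).
def loopA (l : List Int) (tgt : Int) (bt : Nat → List Int → Int → List (List Int)) :
    Nat → Nat → Nat → List Int → Int → List (List Int)
  | 0, _, _, _, _ => []
  | rem+1, i, start, path, csum =>
    if i > start ∧ l[i]! = l[i-1]! then loopA l tgt bt rem (i+1) start path csum
    else if csum + l[i]! > tgt then []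
    else bt (i+1) (path ++ [l[i]!]) (csum + l[i]!) ++
         loopA l tgt bt rem (i+1) start path csum

def btA (l : List Int) (mn mx tgt : Int) : Nat → Nat → List Int → Int → List (List Int)
  | 0, _, _, _ => []
  | fuel+1, start, path, csum =>
    (if mn ≤ (path.length : Int) ∧ (path.length : Int) ≤ mx ∧ csum = tgt then [path] else []) ++
    (if (path.length : Int) ≥ mx ∨ csum ≥ tgt then []
     else loopA l tgt (fun s p c => btA l mn mx tgt fuel s p c)
            (l.length - start) start start path csum)

def subsets_with_constraints (nums : List Int) (min_size : Int) (max_size : Int) (target_sum : Int) : List (List Int) :=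
  let l := PySem.List.sorted nums (fun x => x) false
  btA l min_size max_size target_sum (l.length + 1) 0 [] 0

-- ===== PORT B =====
-- _groups: the while-loop run counter (rem is the loop's fuel, sufficient at the call),
-- then the grouped recursion rec/its group loop from Source B (fuel as for A).
def runLen (xs : List Int) (v : Int) : Nat → Nat → Nat
  | 0, run => run
  | rem+1, run => if run < xs.length ∧ xs[run]! = v then runLen xs v rem (run+1) else run

def mkGroupsB : Nat → List Int → List (Int × Nat)
  | 0, _ => []
  | _+1, [] => []
  | fuel+1, x :: xs =>
    let run := runLen (x :: xs) x (x :: xs).length 1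
    (x, run) :: mkGroupsB fuel ((x :: xs).drop run)

def loopB (mn mx tgt : Int) (rc : List (Int × Nat) → List Int → Int → List (List Int)) :
    List (Int × Nat) → List Int → Int → List (List Int)
  | [], _, _ => []
  | (v, c) :: tl, path, csum =>
    if csum + v > tgt then []
    else rc (if 1 < c then (v, c-1) :: tl else tl) (path ++ [v]) (csum + v) ++
         loopB mn mx tgt rc tl path csum

def recB (mn mx tgt : Int) : Nat → List (Int × Nat) → List Int → Int → List (List Int)
  | 0, _, _, _ => []
  | fuel+1, gs, path, csum =>
    (if mn ≤ (path.length : Int) ∧ (path.length : Int) ≤ mx ∧ csum = tgt then [path] else []) ++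
    (if (path.length : Int) ≥ mx ∨ csum ≥ tgt then []
     else loopB mn mx tgt (fun gs' p c => recB mn mx tgt fuel gs' p c) gs path csum)

def subsets_with_constraints_alt (nums : List Int) (min_size : Int) (max_size : Int) (target_sum : Int) : List (List Int) :=
  let l := PySem.List.sorted nums (fun x => x) false
  recB min_size max_size target_sum (l.length + 1) (mkGroupsB l.length l) [] 0

-- ===== PRECONDITION & SPEC =====
def Spec_subsets_with_constraints (nums : List Int) (min_size : Int) (max_size : Int) (target_sum : Int) (out : List (List Int)) : Prop := out = subsets_with_constraints_alt nums min_size max_size target_sum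
instance (nums : List Int) (min_size : Int) (max_size : Int) (target_sum : Int) (out : List (List Int)) : Decidable (Spec_subsets_with_constraints nums min_size max_size target_sum out) := by unfold Spec_subsets_with_constraints; infer_instance

-- ===== CLAIM (what is proved, stated in full; the proofs are below) =====
def Claim_equal_subsets_with_constraints : Prop := ∀ (nums : List Int) (min_size : Int) (max_size : Int) (target_sum : Int), Dom_subsets_with_constraints nums min_size max_size target_sum → Spec_subsets_with_constraints nums min_size max_size target_sum (subsets_with_constraints nums min_size max_size target_sum)

-- ===== LEMMAS AND PROOFS =====

-- The group list of l with the fuel B's port uses (proof-side abbreviation).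
def pvGroups (l : List Int) : List (Int × Nat) := mkGroupsB l.length l

-- dropWhile is drop of the takeWhile length.
theorem pvDropWhile_eq_drop (p : Int → Bool) (l : List Int) :
    l.dropWhile p = l.drop (l.takeWhile p).length := by
  have h := List.drop_left (l₁ := l.takeWhile p) (l₂ := l.dropWhile p)
  rw [List.takeWhile_append_dropWhile] at h
  exact h.symm

theorem pvTwLenLe (p : Int → Bool) (l : List Int) : (l.takeWhile p).length ≤ l.length :=
  (List.takeWhile_prefix p).length_le

theorem pvDwLenLe (p : Int → Bool) (l : List Int) : (l.dropWhile p).length ≤ l.length := by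
  rw [pvDropWhile_eq_drop]
  simp [List.length_drop]

-- Every element inside the takeWhile prefix satisfies p.
theorem pvTwGetElem (p : Int → Bool) (l : List Int) (k : Nat) (h : k < (l.takeWhile p).length) :
    p (l[k]'(lt_of_lt_of_le h (pvTwLenLe p l))) = true := by
  have hm : (l.takeWhile p)[k] ∈ l.takeWhile p := List.getElem_mem _
  have h2 := List.mem_takeWhile_imp hm
  rwa [(List.takeWhile_prefix p).getElem h] at h2

-- The first element after the takeWhile prefix fails p.
theorem pvAfterTw (p : Int → Bool) : ∀ (l : List Int) (h : (l.takeWhile p).length < l.length),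
    p (l[(l.takeWhile p).length]'h) = false := by
  intro l
  induction l with
  | nil => intro h; simp at h
  | cons x xs ih =>
    intro h
    by_cases hp : p x = true
    · simp only [List.takeWhile_cons, hp, if_true, List.length_cons] at h ⊢
      simpa using ih (by omega)
    · have hpf : p x = false := by revert hp; cases p x <;> simp
      simp only [List.takeWhile_cons, hpf] at h ⊢
      simpa using hpf

-- runLen with sufficient fuel counts the leading run from position `run`.
theorem runLen_eq (xs : List Int) (v : Int) :
    ∀ rem run, xs.length ≤ rem + run →
      runLen xs v rem run = run + ((xs.drop run).takeWhile (fun x => x == v)).length := by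
  intro rem
  induction rem with
  | zero =>
    intro run hr
    rw [List.drop_eq_nil_of_le (by omega)]
    simp [runLen]
  | succ rem ih =>
    intro run h
    rw [runLen]
    by_cases h1 : run < xs.length
    · by_cases h2 : xs[run]! = v
      · rw [if_pos ⟨h1, h2⟩, ih (run+1) (by omega)]
        rw [getElem!_pos xs run h1] at h2
        rw [List.drop_eq_getElem_cons h1]
        have hb : (xs[run] == v) = true := by simp [h2]
        simp only [List.takeWhile_cons, hb, if_true, List.length_cons]
        omega
      · rw [if_neg (by intro hc; exact h2 hc.2)]
        rw [getElem!_pos xs run h1] at h2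
        rw [List.drop_eq_getElem_cons h1]
        have hb : (xs[run] == v) = false := by simp [h2]
        simp [hb]
    · rw [if_neg (by intro hc; exact h1 hc.1)]
      rw [List.drop_eq_nil_of_le (by omega)]
      simp

-- One unfolding of mkGroupsB with sufficient fuel.
theorem mkGroupsB_cons (fuel : Nat) (x : Int) (xs : List Int) :
    mkGroupsB (fuel + 1) (x :: xs) =
      (x, (xs.takeWhile (fun y => y == x)).length + 1)
        :: mkGroupsB fuel (xs.dropWhile (fun y => y == x)) := by
  rw [mkGroupsB]
  have hr : runLen (x :: xs) x (x :: xs).length 1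
      = (xs.takeWhile (fun y => y == x)).length + 1 := by
    rw [runLen_eq (x :: xs) x (x :: xs).length 1 (by omega)]
    simp only [List.drop_succ_cons, List.drop_zero]
    omega
  simp only [hr, List.drop_succ_cons]
  rw [← pvDropWhile_eq_drop]

-- mkGroupsB is fuel-irrelevant above the list length; pvGroups names the result.
theorem mkGroupsB_suff : ∀ (fuel : Nat) (l : List Int), l.length ≤ fuel →
    mkGroupsB fuel l = pvGroups l := by
  intro fuel
  induction fuel using Nat.strong_induction_on with
  | _ fuel ih =>
    intro l hl
    match fuel, l with
    | 0, [] => rfl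
    | f+1, [] => rfl
    | f+1, x :: xs =>
      simp only [List.length_cons] at hl
      rw [mkGroupsB_cons f x xs]
      unfold pvGroups
      simp only [List.length_cons]
      rw [mkGroupsB_cons xs.length x xs]
      have hd : (xs.dropWhile (fun y => y == x)).length ≤ xs.length := pvDwLenLe _ _
      rw [ih f (by omega) _ (by omega), ih xs.length (by omega) _ (by omega)]

theorem pvGroups_cons (x : Int) (xs : List Int) :
    pvGroups (x :: xs) =
      (x, (xs.takeWhile (fun y => y == x)).length + 1)
        :: pvGroups (xs.dropWhile (fun y => y == x)) := by
  unfold pvGroups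
  simp only [List.length_cons]
  rw [mkGroupsB_cons xs.length x xs]
  rw [mkGroupsB_suff xs.length _ (pvDwLenLe _ _)]
  rfl

-- The groups of the tail of a run head: decrement the count or drop the group.
theorem pvGroups_tail (v : Int) (rest : List Int) :
    pvGroups rest =
      (if 1 < (rest.takeWhile (fun y => y == v)).length + 1
       then (v, (rest.takeWhile (fun y => y == v)).length + 1 - 1)
              :: pvGroups (rest.dropWhile (fun y => y == v))
       else pvGroups (rest.dropWhile (fun y => y == v))) := by
  cases rest with
  | nil => simp [pvGroups, mkGroupsB]
  | cons y ys =>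
    by_cases hy : y = v
    · subst hy
      rw [pvGroups_cons]
      simp
    · have hb : (y == v) = false := by simp [hy]
      simp [hb]

-- The index loop of A at a run head equals B's loop over the group list of the suffix,
-- given the btA/recB correspondence one fuel level down.
theorem loopA_loopB (l : List Int) (mn mx tgt : Int) (fuel : Nat)
    (ihb : ∀ s path csum, btA l mn mx tgt fuel s path csum
            = recB mn mx tgt fuel (pvGroups (l.drop s)) path csum) :
    ∀ d i start path csum, l.length - i ≤ d → start ≤ i →
      (l.length ≤ i ∨ i = start ∨ l[i]! ≠ l[i-1]!) →
      loopA l tgt (fun s p c => btA l mn mx tgt fuel s p c) (l.length - i) i start path csum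
        = loopB mn mx tgt (fun gs p c => recB mn mx tgt fuel gs p c) (pvGroups (l.drop i)) path csum := by
  intro d
  induction d with
  | zero =>
    intro i start path csum hd _ _
    have hi : l.length ≤ i := by omega
    have h0 : l.length - i = 0 := by omega
    rw [List.drop_eq_nil_of_le hi, h0]
    simp [loopA, pvGroups, mkGroupsB, loopB]
  | succ d ihd =>
    intro i start path csum hd hsi hhead
    by_cases hi : i < l.length
    · have hdropi : l.drop i = l[i] :: l.drop (i+1) := List.drop_eq_getElem_cons hi
      have hgrp : pvGroups (l.drop i)
          = (l[i], ((l.drop (i+1)).takeWhile (fun y => y == l[i])).length + 1)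
              :: pvGroups ((l.drop (i+1)).dropWhile (fun y => y == l[i])) := by
        rw [hdropi, pvGroups_cons]
      set tw := ((l.drop (i+1)).takeWhile (fun y => y == l[i])).length with htw
      have htwle : tw ≤ (l.drop (i+1)).length := pvTwLenLe _ _
      have hlen : i + 1 + tw ≤ l.length := by
        simp only [List.length_drop] at htwle; omega
      have hrun : ∀ m, i ≤ m → m < i + 1 + tw → l[m]! = l[i] := by
        intro m hm1 hm2
        by_cases hm : m = i
        · subst hm; exact getElem!_pos l m hi
        · have hk : m - (i+1) < tw := by omega
          have hb := pvTwGetElem (fun y => y == l[i]) (l.drop (i+1)) (m - (i+1)) hk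
          rw [List.getElem_drop] at hb
          have hb' : (l[i + 1 + (m - (i+1))]! == l[i]) = true := by
            rw [getElem!_pos l _ (by omega)]; exact hb
          have hmm : i + 1 + (m - (i+1)) = m := by omega
          rw [hmm] at hb'
          simpa using hb'
      have hafter : i + 1 + tw < l.length → l[i+1+tw]! ≠ l[i] := by
        intro hlt
        have hk : tw < (l.drop (i+1)).length := by
          simp only [List.length_drop]; omega
        have hb := pvAfterTw (fun y => y == l[i]) (l.drop (i+1)) (htw ▸ hk)
        rw [List.getElem_drop] at hb
        have hb' : (l[i + 1 + tw]! == l[i]) = false := by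
          rw [getElem!_pos l _ hlt]; exact hb
        intro hcontra
        rw [hcontra] at hb'
        simp at hb'
      have htail : pvGroups ((l.drop (i+1)).dropWhile (fun y => y == l[i]))
          = pvGroups (l.drop (i+1+tw)) := by
        rw [pvDropWhile_eq_drop, List.drop_drop]
      have hrem : l.length - i = (l.length - (i+1)) + 1 := by omega
      rw [hrem, hgrp, loopA, loopB]
      have hskip : ¬(i > start ∧ l[i]! = l[i-1]!) := by
        rcases hhead with h | h | h
        · omega
        · omega
        · intro hc; exact h hc.2
      rw [if_neg hskip]
      rw [getElem!_pos l i hi]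
      by_cases hbr : csum + l[i] > tgt
      · rw [if_pos hbr, if_pos hbr]
      · rw [if_neg hbr, if_neg hbr]
        congr 1
        · show btA l mn mx tgt fuel (i+1) (path ++ [l[i]]) (csum + l[i])
            = recB mn mx tgt fuel _ (path ++ [l[i]]) (csum + l[i])
          rw [ihb]
          congr 1
          rw [pvGroups_tail l[i] (l.drop (i+1))]
        · have hend : loopA l tgt (fun s p c => btA l mn mx tgt fuel s p c)
                (l.length - (i+1+tw)) (i+1+tw) start path csum
              = loopB mn mx tgt (fun gs p c => recB mn mx tgt fuel gs p c)
                (pvGroups (l.drop (i+1+tw))) path csum := by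
            apply ihd
            · omega
            · omega
            · by_cases he : l.length ≤ i+1+tw
              · exact Or.inl he
              · refine Or.inr (Or.inr ?_)
                have h1 := hafter (by omega)
                have h2 : l[i+1+tw-1]! = l[i] := hrun (i+1+tw-1) (by omega) (by omega)
                rw [h2]
                exact h1
          have hskiprun : ∀ e j, i < j → j ≤ i+1+tw → i+1+tw - j ≤ e →
              loopA l tgt (fun s p c => btA l mn mx tgt fuel s p c) (l.length - j) j start path csum
                = loopA l tgt (fun s p c => btA l mn mx tgt fuel s p c)
                    (l.length - (i+1+tw)) (i+1+tw) start path csum := by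
            intro e
            induction e with
            | zero =>
              intro j h1 h2 h3
              have : j = i+1+tw := by omega
              rw [this]
            | succ e ihe =>
              intro j h1 h2 h3
              by_cases hj : j = i+1+tw
              · rw [hj]
              · have hj2 : j < i+1+tw := by omega
                have hjlen : j < l.length := by omega
                have hremj : l.length - j = (l.length - (j+1)) + 1 := by omega
                rw [hremj, loopA]
                have hsk : j > start ∧ l[j]! = l[j-1]! := by
                  refine ⟨by omega, ?_⟩
                  rw [hrun j (by omega) (by omega), hrun (j-1) (by omega) (by omega)]
                rw [if_pos hsk]
                exact ihe (j+1) (by omega) (by omega) (by omega)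
          rw [hskiprun tw (i+1) (by omega) (by omega) (by omega), hend, htail]
    · have h0 : l.length - i = 0 := by omega
      rw [List.drop_eq_nil_of_le (by omega), h0]
      simp [loopA, pvGroups, mkGroupsB, loopB]

-- A's backtracking at start index s equals B's grouped recursion on the groups of drop s.
theorem btA_recB (l : List Int) (mn mx tgt : Int) :
    ∀ fuel s path csum, btA l mn mx tgt fuel s path csum
      = recB mn mx tgt fuel (pvGroups (l.drop s)) path csum := by
  intro fuel
  induction fuel with
  | zero => intro s path csum; simp [btA, recB]
  | succ fuel ih =>
    intro s path csum
    rw [btA, recB]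
    congr 1
    by_cases hp : ((path.length : Int) ≥ mx ∨ csum ≥ tgt)
    · rw [if_pos hp, if_pos hp]
    · rw [if_neg hp, if_neg hp]
      exact loopA_loopB l mn mx tgt fuel ih (l.length - s) s s path csum (le_refl _) (le_refl s)
        (by by_cases h : l.length ≤ s
            · exact Or.inl h
            · exact Or.inr (Or.inl rfl))

-- ===== VERDICT (by name: the statement is the Claim_ definition above) =====
theorem subsets_with_constraints_spec : Claim_equal_subsets_with_constraints := by
  intro nums mn mx tgt _
  unfold Spec_subsets_with_constraints subsets_with_constraints subsets_with_constraints_alt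
  rw [btA_recB]
  simp [pvGroups]
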